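-- pv_equiv track=rewrite | github.com/KyleGortych/Sample_Work | school/eCornell/Python Cert/Controlling Programming Flow/while statements/exercise3/funcs.py | skip
-- ===== SOURCE A (Python) =====
-- def skip(s,n):
--     """
--     Returns a copy of s, only including positions that are multiples of n
--
--     A position is a multiple of n if pos % n == 0.
--
--     Examples:
--         skip('hello world',1) returns 'hello world'
--         skip('hello world',2) returns 'hlowrd'
--         skip('hello world',3) returns 'hlwl'
--         skip('hello world',4) returns 'hor'
--
--     Parameter s: the string to copy
--     Precondition: s is a nonempty string
--
--     Parameter n: the letter positions to accept
--     Precondition: n is an int > 0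
--     """
--     assert type(s) == str and len(s) > 0
--     assert type(n) == int and n > 0
--     # You must use a while-loop, not a for-loop
--     var = []
--     var2 = True
--     pos = 0
--     count = 1
--
--     while var2:
--         if pos % n == 0 and count <= len(s):
--             var.append(s[pos])
--             pos += 1
--             count += 1
--         elif pos % n != 0 and count <= len(s):
--             pos += 1
--             count += 1
--         else:
--             var2 = False
--     return ''.join(var)
-- ===== SOURCE B (Python) =====
-- def skip(s, n):
--     """Copy of s keeping positions that are multiples of n (closed-form stride slice)."""
--     assert type(s) == str and len(s) > 0
--     assert type(n) == int and n > 0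
--     return s[::n]
-- ===== Notes on version B (the rewrite author's own statement) =====
-- stated objective: faster
-- what changed: Replaces the while-loop that walks every position with a counter, flag and per-position modulo test by the single extended slice s[::n], which strides directly over indices 0, n, 2n, ...
import Mathlib
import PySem

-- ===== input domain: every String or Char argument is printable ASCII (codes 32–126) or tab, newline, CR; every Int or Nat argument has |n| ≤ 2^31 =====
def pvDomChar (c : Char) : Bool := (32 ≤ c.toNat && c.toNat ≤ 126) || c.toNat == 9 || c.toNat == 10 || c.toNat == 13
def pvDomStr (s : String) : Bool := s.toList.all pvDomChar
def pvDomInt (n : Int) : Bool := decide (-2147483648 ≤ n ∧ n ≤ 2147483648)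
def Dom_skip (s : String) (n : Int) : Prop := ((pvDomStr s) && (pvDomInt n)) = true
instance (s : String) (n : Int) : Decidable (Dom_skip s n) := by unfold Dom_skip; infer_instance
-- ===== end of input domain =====

-- B replaces A's while-loop (counter, flag, per-position modulo test) by the closed-form stride slice s[::n].

-- ===== PORT A =====
-- A's while-loop: state (var, pos, count); the terminating `else` branch (var2 = False) returns var.
-- s[pos] is pyGet?; its `none` case is unreachable (loop invariant pos = count - 1 < len(s)).
def skipLoop (cs : List Char) (n : Int) (var : List Char) (pos count : Int) : List Char :=
  if _h1 : PySem.Int.mod pos n = 0 ∧ count ≤ (cs.length : Int) then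
    match PySem.List.pyGet? cs pos with
    | some c => skipLoop cs n (var ++ [c]) (pos + 1) (count + 1)
    | none => var
  else if _h2 : PySem.Int.mod pos n ≠ 0 ∧ count ≤ (cs.length : Int) then
    skipLoop cs n var (pos + 1) (count + 1)
  else var
termination_by ((cs.length : Int) + 1 - count).toNat
decreasing_by all_goals omega

def skip (s : String) (n : Int) : String :=
  String.ofList (skipLoop s.toList n [] 0 1)

-- ===== PORT B =====
-- Source B: return s[::n].  slice? is none only for step n = 0, which Pre_skip excludes.
def skip_alt (s : String) (n : Int) : String :=
  String.ofList ((PySem.List.slice? s.toList none none n).getD [])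

-- ===== PRECONDITION & SPEC =====
-- Pre_skip is exactly A's (and B's) asserts: AssertionError on empty s or n ≤ 0.
def Pre_skip (s : String) (n : Int) : Prop := s.toList ≠ [] ∧ 0 < n
instance (s : String) (n : Int) : Decidable (Pre_skip s n) := by unfold Pre_skip; infer_instance

def pvWitness_skip : String × Int := ("hello world", 3)

def Spec_skip (s : String) (n : Int) (out : String) : Prop := out = skip_alt s n
instance (s : String) (n : Int) (out : String) : Decidable (Spec_skip s n out) := by unfold Spec_skip; infer_instance

-- ===== CLAIM (what is proved, stated in full; the proofs are below) =====
def Claim_equal_skip : Prop := ∀ (s : String) (n : Int), Dom_skip s n → Pre_skip s n → Spec_skip s n (skip s n)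

-- ===== LEMMAS AND PROOFS =====

-- the per-position filter A's loop applies
def skipF (cs : List Char) (m : Nat) (i : Nat) : Option Char :=
  if i % m = 0 then cs[i]? else none

-- A's loop from pos = p, count = p + 1 collects the filtered positions p, …, len-1.
lemma skipLoop_eq_filterMap (cs : List Char) (m : Nat) (_hm : 0 < m) (var : List Char)
    (p : Nat) (hp : p ≤ cs.length) :
    skipLoop cs (m : Int) var (p : Int) ((p : Int) + 1)
      = var ++ (List.range' p (cs.length - p)).filterMap (skipF cs m) := by
  have key : ∀ d var p, p ≤ cs.length → cs.length - p = d →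
      skipLoop cs (m : Int) var (p : Int) ((p : Int) + 1)
        = var ++ (List.range' p (cs.length - p)).filterMap (skipF cs m) := by
    intro d
    induction d with
    | zero =>
      intro var p hp hd
      have hpl : p = cs.length := by omega
      rw [skipLoop]
      simp [hpl]
    | succ d ih =>
      intro var p hp hd
      have hlt : p < cs.length := by omega
      have hrange : List.range' p (cs.length - p) = p :: List.range' (p+1) (cs.length - (p+1)) := by
        have : cs.length - p = (cs.length - (p+1)) + 1 := by omega
        rw [this, List.range'_succ]
      rw [skipLoop]
      by_cases hmod : p % m = 0
      · have : PySem.Int.mod (p : Int) (m : Int) = 0 := by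
          simp [hmod]
        simp only [this, PySem.List.pyGet?_natCast]
        have hget : cs[p]? = some (cs[p]'hlt) := List.getElem?_eq_getElem hlt
        rw [dif_pos ⟨trivial, by omega⟩, hget]
        have := ih (var ++ [cs[p]'hlt]) (p+1) (by omega) (by omega)
        push_cast at this ⊢
        rw [this, hrange]
        simp [skipF, hmod, hget]
      · have hmz : PySem.Int.mod (p : Int) (m : Int) ≠ 0 := by
          simp only [Ne, PySem.Int.mod_eq_zero_iff_dvd, Int.natCast_dvd_natCast]
          exact fun h => hmod (Nat.mod_eq_zero_of_dvd h)
        rw [dif_neg (fun h => hmz h.1), dif_pos ⟨hmz, by omega⟩]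
        have := ih var (p+1) (by omega) (by omega)
        push_cast at this ⊢
        rw [this, hrange]
        simp [skipF, hmod]
  exact key _ var p hp rfl

-- ceiling-division step
lemma ceil_succ (l m : Nat) (hm : 0 < m) :
    (l + 1 + m - 1) / m = (l + m - 1) / m + (if m ∣ l then 1 else 0) := by
  by_cases hdvd : m ∣ l
  · obtain ⟨q, rfl⟩ := hdvd
    rw [if_pos ⟨q, rfl⟩]
    rw [show m * q + 1 + m - 1 = m * (q + 1) + 0 by rw [Nat.mul_succ]; omega,
        show m * q + m - 1 = m * q + (m - 1) by omega,
        Nat.mul_add_div hm, Nat.mul_add_div hm,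
        Nat.div_eq_of_lt (by omega), Nat.div_eq_of_lt (by omega)]
  · rw [if_neg hdvd]
    have hr : 0 < l % m := by
      rcases Nat.eq_zero_or_pos (l % m) with h | h
      · exact absurd ((Nat.dvd_iff_mod_eq_zero ..).2 h) hdvd
      · exact h
    obtain ⟨q, r, hrm, rfl⟩ : ∃ q r, r = l % m ∧ l = m * q + r :=
      ⟨l / m, l % m, rfl, (Nat.div_add_mod l m).symm⟩
    have hrlt : r < m := hrm ▸ Nat.mod_lt _ hm
    have hr0 : 0 < r := hrm ▸ hr
    rw [show m * q + r + 1 + m - 1 = m * (q + 1) + r by rw [Nat.mul_succ]; omega,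
        show m * q + r + m - 1 = m * (q + 1) + (r - 1) by rw [Nat.mul_succ]; omega,
        Nat.mul_add_div hm, Nat.mul_add_div hm,
        Nat.div_eq_of_lt (by omega), Nat.div_eq_of_lt (by omega)]

-- the multiples of m below l, in ascending order
lemma filter_range_mod (l m : Nat) (hm : 0 < m) :
    (List.range l).filter (fun i => i % m == 0)
      = (List.range ((l + m - 1) / m)).map (fun k => m * k) := by
  induction l with
  | zero => simp [Nat.div_eq_of_lt (show m - 1 < m by omega)]
  | succ l ih =>
    rw [List.range_succ, List.filter_append, ih, ceil_succ l m hm]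
    by_cases hdvd : m ∣ l
    · obtain ⟨q, rfl⟩ := hdvd
      have hc : (m * q + m - 1) / m = q := by
        rw [show m * q + m - 1 = m * q + (m - 1) by omega, Nat.mul_add_div hm,
            Nat.div_eq_of_lt (show m - 1 < m by omega)]
        omega
      simp [Nat.dvd_mul_right, hc, List.range_succ, Nat.mul_mod_right]
    · have : ¬ (l % m == 0) = true := by
        simp [Nat.dvd_iff_mod_eq_zero] at hdvd ⊢
        omega
      simp [hdvd, this]

-- A's loop result equals B's slice result
lemma lists_agree (cs : List Char) (m : Nat) (hm : 0 < m) :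
    skipLoop cs (m : Int) [] 0 1
      = (PySem.List.slice? cs none none (m : Int)).getD [] := by
  have hL := skipLoop_eq_filterMap cs m hm [] 0 (Nat.zero_le _)
  simp only [Nat.cast_zero, Nat.sub_zero, List.nil_append, zero_add] at hL
  rw [hL]
  have hstep : (m : Int) ≠ 0 := by exact_mod_cast hm.ne'
  have hneg : ¬ ((m:Int) < 0) := by omega
  have hpos : (0:Int) < m := by exact_mod_cast hm
  simp only [PySem.List.slice?, PySem.List.sliceIndices, if_neg hstep, if_neg hneg,
    if_pos hpos, Option.getD_some]
  rcases Nat.eq_zero_or_pos cs.length with h0 | h0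
  · simp [h0]
  · have hlt : (0:Int) < (cs.length:Int) := by exact_mod_cast h0
    rw [if_pos (by simpa using hlt)]
    have hcount : (((cs.length:Int) - 0 + (m:Int) - 1) / (m:Int)).toNat = (cs.length + m - 1) / m := by
      rw [show ((cs.length:Int) - 0 + (m:Int) - 1) = ((cs.length + m - 1 : Nat) : Int) by omega,
        ← Int.natCast_div, Int.toNat_natCast]
    rw [hcount, ← List.range_eq_range']
    have hsplit : List.filterMap (skipF cs m) (List.range cs.length)
        = List.filterMap (fun i => cs[i]?) ((List.range cs.length).filter (fun i => i % m == 0)) := by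
      rw [List.filterMap_filter]
      congr 1
      funext i
      by_cases h : i % m = 0 <;> simp [skipF, h]
    rw [hsplit, filter_range_mod _ _ hm, List.filterMap_map]
    congr 1
    funext k
    simp [Function.comp]
    rw [show ((m:Int) * (k:Int)).toNat = m * k by rw [← Nat.cast_mul, Int.toNat_natCast]]

-- ===== VERDICT (by name: the statement is the Claim_ definition above) =====
theorem skip_spec : Claim_equal_skip := by
  intro s n _ hpre
  unfold Spec_skip skip skip_alt
  obtain ⟨hs, hn⟩ := hpre
  obtain ⟨m, rfl⟩ : ∃ m : Nat, n = (m : Int) := ⟨n.toNat, (Int.toNat_of_nonneg hn.le).symm⟩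
  have hm : 0 < m := by exact_mod_cast hn
  rw [lists_agree s.toList m hm]
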